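-- pv_equiv track=rewrite | github.com/cacaocat-syr/Various-Python-Scripts | Keypad-Solver.py | numKeypadSolutions
-- ===== SOURCE A (Python) =====
-- def numKeypadSolutions(wordlist, keypads):
--     # Write your code here
--     count_array = []
--     for pad in keypads:
--         count = 0
--         for word in wordlist:
--             if pad[0:1] not in word:
--                 continue
--             subcount = 0
--             for letter in word:
--                 if letter in pad:
--                     subcount += 1
--             if subcount >= 5 and subcount == len(word):
--                 count += 1
--         count_array.append(count)
--     return count_array
-- ===== SOURCE B (Python) =====
-- def numKeypadSolutions(wordlist, keypads):
--     # Word-major single pass with integer bitmasks: precompute each keypad's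
--     # letter mask once, then for each long-enough word compute its mask and bump
--     # every matching keypad's counter (A is pad-major with per-char scans).
--     pads = []
--     for pad in keypads:
--         m = 0
--         for ch in pad:
--             m |= 1 << ord(ch)
--         first = (1 << ord(pad[0])) if pad else 0
--         pads.append((first, m))
--     counts = [0] * len(keypads)
--     for word in wordlist:
--         if len(word) < 5:
--             continue
--         w = 0
--         for ch in word:
--             w |= 1 << ord(ch)
--         counts = [c + 1 if (w & first) != 0 and (w | m) == m else c
--                   for c, (first, m) in zip(counts, pads)]
--     return counts
-- ===== Notes on version B (the rewrite author's own statement) =====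
-- stated objective: faster
-- what changed: B inverts the loop nesting (word-major instead of pad-major) and works on precomputed integer bitmasks: each keypad becomes a (first-letter bit, letter mask) pair once, then a single pass over the words bumps every matching keypad's counter with two O(1) bitwise tests, eliminating A's inner per-letter scans ('letter in pad' is itself a scan).
import Mathlib
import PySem

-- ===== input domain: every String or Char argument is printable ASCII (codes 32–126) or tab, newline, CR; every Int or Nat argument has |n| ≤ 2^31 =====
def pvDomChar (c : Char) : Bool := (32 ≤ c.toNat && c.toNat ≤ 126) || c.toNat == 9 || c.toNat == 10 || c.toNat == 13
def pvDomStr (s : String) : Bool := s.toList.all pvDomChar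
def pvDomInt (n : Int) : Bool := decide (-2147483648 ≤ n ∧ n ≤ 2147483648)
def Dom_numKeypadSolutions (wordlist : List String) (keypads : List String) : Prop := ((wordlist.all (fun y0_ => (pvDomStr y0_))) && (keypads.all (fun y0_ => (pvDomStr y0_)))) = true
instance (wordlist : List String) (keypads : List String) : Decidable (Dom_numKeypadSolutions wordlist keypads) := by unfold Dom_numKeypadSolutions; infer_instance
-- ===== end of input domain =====

-- B replaces A's pad-major loop with per-char scans by a word-major single pass
-- over the wordlist using precomputed integer bitmasks (objective: faster).

-- ===== PORT A =====
def numKeypadSolutions (wordlist : List String) (keypads : List String) : List Int :=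
  keypads.foldl (fun count_array pad =>
    count_array ++ [wordlist.foldl (fun count word =>
      if PySem.Chars.isIn (PySem.List.slice pad.toList (some 0) (some 1)) word.toList = false then
        count
      else
        let subcount := word.toList.foldl (fun sc letter =>
          if PySem.Chars.isIn [letter] pad.toList then sc + 1 else sc) (0 : Int)
        if subcount ≥ 5 ∧ subcount = (PySem.Chars.len word.toList : Int) then count + 1
        else count) (0 : Int)]) []

-- ===== PORT B =====
-- helper for Source B's inline mask-building loops ('m = 0; for ch in s: m |= 1 << ord(ch)')
def pvMask (l : List Char) : Nat := l.foldl (fun m c => m ||| (1 <<< c.toNat)) 0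

def numKeypadSolutions_alt (wordlist : List String) (keypads : List String) : List Int :=
  let pads : List (Nat × Nat) := keypads.foldl (fun acc pad =>
    let m := pvMask pad.toList
    let first : Nat := match pad.toList with | [] => 0 | c :: _ => 1 <<< c.toNat
    acc ++ [(first, m)]) []
  let counts : List Int := List.replicate keypads.length 0
  wordlist.foldl (fun counts word =>
    if word.toList.length < 5 then counts
    else
      let w := pvMask word.toList
      List.zipWith (fun c (p : Nat × Nat) =>
        if w &&& p.1 ≠ 0 ∧ (w ||| p.2) = p.2 then c + 1 else c) counts pads) counts

-- ===== PRECONDITION & SPEC =====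
def Spec_numKeypadSolutions (wordlist : List String) (keypads : List String) (out : List Int) : Prop := out = numKeypadSolutions_alt wordlist keypads
instance (wordlist : List String) (keypads : List String) (out : List Int) : Decidable (Spec_numKeypadSolutions wordlist keypads out) := by unfold Spec_numKeypadSolutions; infer_instance

-- ===== CLAIM (what is proved, stated in full; the proofs are below) =====
def Claim_equal_numKeypadSolutions : Prop := ∀ (wordlist : List String) (keypads : List String), Dom_numKeypadSolutions wordlist keypads → Spec_numKeypadSolutions wordlist keypads (numKeypadSolutions wordlist keypads)

-- ===== LEMMAS AND PROOFS =====

-- A's acceptance test for one word on one pad, as a single Boolean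
def pvFitA (padl wordl : List Char) : Bool :=
  match padl with
  | [] => false
  | f :: _ => decide (f ∈ wordl ∧ ((wordl.length : Int) ≥ 5 ∧ ∀ c ∈ wordl, c ∈ padl))

-- B's per-pad precomputation and acceptance test
def pvPinfo (pad : String) : Nat × Nat :=
  ((match pad.toList with | [] => 0 | c :: _ => 1 <<< c.toNat), pvMask pad.toList)

def pvFitB (word : String) (p : Nat × Nat) : Bool :=
  decide (¬ word.toList.length < 5 ∧ pvMask word.toList &&& p.1 ≠ 0 ∧ (pvMask word.toList ||| p.2) = p.2)

lemma charToNatInj (c d : Char) (h : c.toNat = d.toNat) : c = d := by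
  apply Char.ext; apply UInt32.toNat_inj.mp; exact h

-- Python's `c in s` for a single character is membership
lemma isIn_singleton (c : Char) (l : List Char) :
    PySem.Chars.isIn [c] l = decide (c ∈ l) := by
  by_cases h : c ∈ l
  · rw [(PySem.Chars.isIn_iff_infix [c] l).2 ((List.singleton_infix_iff c l).2 h)]
    simp [h]
  · rw [(PySem.Chars.isIn_eq_false_iff [c] l).2 (fun hinf => h ((List.singleton_infix_iff c l).1 hinf))]
    simp [h]

-- pad[0:1] is the first character (or empty)
lemma slice_zero_one (l : List Char) :
    PySem.List.slice l (some 0) (some 1) = l.take 1 := by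
  have h0 : ((0 : Nat) : Int) = (0 : Int) := rfl
  have h1 : ((1 : Nat) : Int) = (1 : Int) := rfl
  rw [← h0, ← h1, PySem.List.slice_natCast]
  simp

-- A's inner subcount loop counts the letters of `word` that occur in `pad`
lemma subcount_eq (pad word : List Char) :
    word.foldl (fun sc letter =>
        if PySem.Chars.isIn [letter] pad then sc + 1 else sc) (0 : Int)
      = (word.countP (fun c => decide (c ∈ pad)) : Int) := by
  have h := PySem.List.foldl_count_if (fun c => PySem.Chars.isIn [c] pad) word 0
  simp only [h, zero_add]
  congr 1
  exact List.countP_congr (fun c _ => by rw [isIn_singleton])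

-- per word: A's body is 'count + 1 iff pvFitA'
lemma word_cond_eq (padl : List Char) (word : String) (count : Int) :
    (if PySem.Chars.isIn (PySem.List.slice padl (some 0) (some 1)) word.toList = false then
        count
      else
        let subcount := word.toList.foldl (fun sc letter =>
          if PySem.Chars.isIn [letter] padl then sc + 1 else sc) (0 : Int)
        if subcount ≥ 5 ∧ subcount = (PySem.Chars.len word.toList : Int) then count + 1
        else count)
    = (if pvFitA padl word.toList then count + 1 else count) := by
  rw [slice_zero_one]
  cases padl with
  | nil =>
    simp only [List.take_nil, PySem.Chars.isIn_nil]
    rw [subcount_eq]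
    simp [pvFitA]
  | cons f rest =>
    simp only [List.take_succ_cons, List.take_zero]
    rw [isIn_singleton f word.toList, subcount_eq, PySem.Chars.len_eq]
    have hiff : word.toList.countP (fun c => decide (c ∈ f :: rest)) = word.toList.length
        ↔ (∀ c ∈ word.toList, c ∈ f :: rest) := by
      rw [List.countP_eq_length]
      constructor
      · intro h c hc; simpa using h c hc
      · intro h c hc; simpa using h c hc
    by_cases hf : f ∈ word.toList
    · rw [if_neg (by simp [hf])]
      by_cases hC : ((word.toList.length : Int)) ≥ 5 ∧ (∀ c ∈ word.toList, c ∈ f :: rest)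
      · have h := hiff.2 hC.2
        rw [if_pos ⟨by rw [h]; exact hC.1, by rw [h]⟩]
        rw [if_pos (by simp only [pvFitA, decide_eq_true_eq]; exact ⟨hf, hC⟩)]
      · rw [if_neg (by
          rintro ⟨h5, heq⟩
          exact hC ⟨heq ▸ h5, hiff.1 (Int.natCast_inj.mp heq)⟩)]
        rw [if_neg (by simp only [pvFitA, decide_eq_true_eq]; exact fun h => hC h.2)]
    · rw [if_pos (by simp [hf]), if_neg (by simp [pvFitA, hf])]

-- A returns, per pad, the number of words passing pvFitA
lemma A_eq (wordlist keypads : List String) :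
    numKeypadSolutions wordlist keypads
      = keypads.map (fun pad => ((wordlist.countP (fun word => pvFitA pad.toList word.toList)) : Int)) := by
  unfold numKeypadSolutions
  have hbody : ∀ (pad : String),
      wordlist.foldl (fun count word =>
        if PySem.Chars.isIn (PySem.List.slice pad.toList (some 0) (some 1)) word.toList = false then
          count
        else
          let subcount := word.toList.foldl (fun sc letter =>
            if PySem.Chars.isIn [letter] pad.toList then sc + 1 else sc) (0 : Int)
          if subcount ≥ 5 ∧ subcount = (PySem.Chars.len word.toList : Int) then count + 1
          else count) (0 : Int)
      = ((wordlist.countP (fun word => pvFitA pad.toList word.toList)) : Int) := by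
    intro pad
    rw [show (fun (count : Int) (word : String) =>
        if PySem.Chars.isIn (PySem.List.slice pad.toList (some 0) (some 1)) word.toList = false then
          count
        else
          let subcount := word.toList.foldl (fun sc letter =>
            if PySem.Chars.isIn [letter] pad.toList then sc + 1 else sc) (0 : Int)
          if subcount ≥ 5 ∧ subcount = (PySem.Chars.len word.toList : Int) then count + 1
          else count)
      = (fun (count : Int) (word : String) =>
          if pvFitA pad.toList word.toList then count + 1 else count)
      from funext fun count => funext fun word => word_cond_eq pad.toList word count]
    rw [PySem.List.foldl_if_add_one, zero_add]
  rw [show (fun (count_array : List Int) (pad : String) =>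
      count_array ++ [wordlist.foldl (fun count word =>
        if PySem.Chars.isIn (PySem.List.slice pad.toList (some 0) (some 1)) word.toList = false then
          count
        else
          let subcount := word.toList.foldl (fun sc letter =>
            if PySem.Chars.isIn [letter] pad.toList then sc + 1 else sc) (0 : Int)
          if subcount ≥ 5 ∧ subcount = (PySem.Chars.len word.toList : Int) then count + 1
          else count) (0 : Int)])
    = (fun (count_array : List Int) (pad : String) =>
      count_array ++ [((wordlist.countP (fun word => pvFitA pad.toList word.toList)) : Int)])
    from funext fun ca => funext fun pad => by rw [hbody pad]]
  rw [PySem.List.foldl_append_singleton_eq_map]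
  simp

-- ---- bitmask lemmas ----
lemma mask_testBit (l : List Char) : ∀ (m k : Nat),
    (l.foldl (fun m c => m ||| (1 <<< c.toNat)) m).testBit k
      = (m.testBit k || l.any (fun c => c.toNat == k)) := by
  induction l with
  | nil => intro m k; simp
  | cons c rest ih =>
    intro m k
    rw [List.foldl_cons, ih]
    simp [Nat.testBit_or, Nat.one_shiftLeft, Nat.testBit_two_pow, Bool.or_assoc, beq_eq_decide]

lemma pvMask_testBit (l : List Char) (k : Nat) :
    (pvMask l).testBit k = l.any (fun c => c.toNat == k) := by
  simpa [Nat.zero_testBit] using mask_testBit l 0 k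

lemma mem_iff_mask (c : Char) (l : List Char) :
    (pvMask l).testBit c.toNat = true ↔ c ∈ l := by
  rw [pvMask_testBit]
  simp only [List.any_eq_true, beq_iff_eq]
  constructor
  · rintro ⟨d, hd, h⟩; exact (charToNatInj d c h) ▸ hd
  · intro h; exact ⟨c, h, rfl⟩

lemma first_cond (w : Nat) (f : Char) :
    (w &&& (1 <<< f.toNat) ≠ 0) ↔ w.testBit f.toNat = true := by
  rw [Nat.one_shiftLeft, Nat.and_two_pow]
  cases h : w.testBit f.toNat <;> simp [Nat.pow_eq_zero]

lemma or_eq_iff (w m : Nat) :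
    (w ||| m) = m ↔ ∀ k, w.testBit k = true → m.testBit k = true := by
  constructor
  · intro h k hk
    have h2 := congrArg (fun n => n.testBit k) h
    simp only [Nat.testBit_or, hk, Bool.true_or] at h2
    exact h2.symm
  · intro h
    apply Nat.eq_of_testBit_eq
    intro k
    rw [Nat.testBit_or]
    cases hw : w.testBit k
    · simp
    · simp [h k hw]

-- B's precomputed test agrees with A's per-word test
lemma fit_eq (pad word : String) :
    pvFitA pad.toList word.toList = pvFitB word (pvPinfo pad) := by
  unfold pvFitA pvFitB pvPinfo
  cases hp : pad.toList with
  | nil => simp [pvMask]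
  | cons f rest =>
    rw [← hp]
    have hiff : (f ∈ word.toList ∧ ((word.toList.length : Int) ≥ 5 ∧ ∀ c ∈ word.toList, c ∈ pad.toList))
        ↔ (¬ word.toList.length < 5 ∧ pvMask word.toList &&& (1 <<< f.toNat) ≠ 0 ∧
            (pvMask word.toList ||| pvMask pad.toList) = pvMask pad.toList) := by
      constructor
      · rintro ⟨hf, h5, hsub⟩
        refine ⟨by omega, (first_cond _ f).2 ((mem_iff_mask f word.toList).2 hf), (or_eq_iff _ _).2 ?_⟩
        intro k hk
        rw [pvMask_testBit] at hk
        obtain ⟨c, hc, hck⟩ := by simpa only [List.any_eq_true, beq_iff_eq] using hk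
        exact hck ▸ (mem_iff_mask c pad.toList).2 (hsub c hc)
      · rintro ⟨h5, hfst, hsub⟩
        refine ⟨(mem_iff_mask f word.toList).1 ((first_cond _ f).1 hfst), by omega, ?_⟩
        intro c hc
        exact (mem_iff_mask c pad.toList).1
          ((or_eq_iff _ _).1 hsub c.toNat ((mem_iff_mask c word.toList).2 hc))
    rw [hp] at hiff ⊢
    exact decide_eq_decide.mpr hiff

-- ---- fold-exchange: the word-major accumulation equals per-pad counting ----
lemma zipWith_zipWith {α β γ δ : Type} (f : γ → β → δ) (g : α → β → γ) :
    ∀ (cs : List α) (ps : List β),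
      List.zipWith f (List.zipWith g cs ps) ps = List.zipWith (fun c p => f (g c p) p) cs ps := by
  intro cs
  induction cs with
  | nil => intro ps; simp
  | cons c cs ih => intro ps; cases ps with
    | nil => simp
    | cons p ps => simp [ih]

lemma zip_id (cs : List Int) : ∀ (ps : List (Nat × Nat)), cs.length = ps.length →
    List.zipWith (fun c (_ : Nat × Nat) => c) cs ps = cs := by
  induction cs with
  | nil => intro ps _; simp
  | cons c cs ih => intro ps h; cases ps with
    | nil => simp at h
    | cons p ps => simpa using ih ps (by simpa using h)

lemma fold_exchange (ws : List String) : ∀ (pads : List (Nat × Nat)) (counts : List Int),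
    counts.length = pads.length →
    ws.foldl (fun counts word =>
        if word.toList.length < 5 then counts
        else
          let w := pvMask word.toList
          List.zipWith (fun c (p : Nat × Nat) =>
            if w &&& p.1 ≠ 0 ∧ (w ||| p.2) = p.2 then c + 1 else c) counts pads) counts
      = List.zipWith (fun c p => c + ((ws.countP (fun word => pvFitB word p)) : Int)) counts pads := by
  induction ws with
  | nil =>
    intro pads counts hlen
    simp only [List.foldl_nil, List.countP_nil, Nat.cast_zero, add_zero]
    exact (zip_id counts pads hlen).symm
  | cons w ws ih =>
    intro pads counts hlen
    rw [List.foldl_cons]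
    by_cases h5 : w.toList.length < 5
    · rw [if_pos h5, ih pads counts hlen]
      congr 1
      funext c p
      have hfb : pvFitB w p = false := by
        simp only [pvFitB, decide_eq_false_iff_not]
        rintro ⟨h, _⟩; exact h h5
      simp [hfb]
    · rw [if_neg h5]
      have hlen2 : (List.zipWith (fun c (p : Nat × Nat) =>
          if pvMask w.toList &&& p.1 ≠ 0 ∧ (pvMask w.toList ||| p.2) = p.2 then c + 1 else c)
          counts pads).length = pads.length := by
        rw [List.length_zipWith, hlen, Nat.min_self]
      rw [ih pads _ hlen2, zipWith_zipWith]
      congr 1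
      funext c p
      have hfit : pvFitB w p
          = decide (pvMask w.toList &&& p.1 ≠ 0 ∧ (pvMask w.toList ||| p.2) = p.2) := by
        simp only [pvFitB]
        apply decide_eq_decide.mpr
        constructor
        · rintro ⟨_, h⟩; exact h
        · intro h; exact ⟨h5, h⟩
      rw [List.countP_cons, hfit]
      by_cases hc : pvMask w.toList &&& p.1 ≠ 0 ∧ (pvMask w.toList ||| p.2) = p.2
      · rw [if_pos hc, if_pos (decide_eq_true hc)]
        push_cast
        ring
      · rw [if_neg hc, if_neg (by simp [hc])]
        simp

lemma zip_replicate (wordlist : List String) : ∀ (ps : List (Nat × Nat)),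
    List.zipWith (fun (c : Int) p => c + ((wordlist.countP (fun word => pvFitB word p)) : Int))
      (List.replicate ps.length 0) ps
    = ps.map (fun p => ((wordlist.countP (fun word => pvFitB word p)) : Int)) := by
  intro ps
  induction ps with
  | nil => simp
  | cons p ps ih =>
    simp only [List.length_cons, List.replicate_succ, List.zipWith_cons_cons, List.map_cons,
      ih, zero_add]

-- B returns, per pad, the number of words passing pvFitB on its precomputation
lemma B_eq (wordlist keypads : List String) :
    numKeypadSolutions_alt wordlist keypads
      = keypads.map (fun pad => ((wordlist.countP (fun word => pvFitB word (pvPinfo pad))) : Int)) := by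
  unfold numKeypadSolutions_alt
  rw [show (fun (acc : List (Nat × Nat)) (pad : String) =>
      let m := pvMask pad.toList
      let first : Nat := match pad.toList with | [] => 0 | c :: _ => 1 <<< c.toNat
      acc ++ [(first, m)])
    = (fun (acc : List (Nat × Nat)) (pad : String) => acc ++ [pvPinfo pad])
    from funext fun acc => funext fun pad => rfl]
  rw [PySem.List.foldl_append_singleton_eq_map, List.nil_append]
  rw [fold_exchange wordlist (keypads.map pvPinfo) (List.replicate keypads.length 0)
    (by rw [List.length_replicate, List.length_map])]
  rw [show List.replicate keypads.length (0 : Int)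
      = List.replicate (keypads.map pvPinfo).length 0 by rw [List.length_map]]
  rw [zip_replicate wordlist (keypads.map pvPinfo), List.map_map]
  rfl

-- ===== VERDICT (by name: the statement is the Claim_ definition above) =====
theorem numKeypadSolutions_spec : Claim_equal_numKeypadSolutions := by
  intro wordlist keypads _
  unfold Spec_numKeypadSolutions
  rw [A_eq, B_eq]
  apply List.map_congr_left
  intro pad _
  congr 1
  exact List.countP_congr (fun word _ => by rw [fit_eq pad word])
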